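-- pv_equiv track=rewrite | github.com/JaffarAman/Bootcamp4.0-Ai-Projects | ASSIGNMENT CREATOR/app/app.py | auto_extract_title
-- ===== SOURCE A (Python) =====
-- def auto_extract_title(content):
--     """
--     Intelligently extracts or generates a title from the markdown content.
--     Looks for the first H1 header (#) or falls back to the first line.
--     """
--     lines = content.strip().split('\n')
--     for line in lines:
--         clean_line = line.strip()
--         if clean_line.startswith('#'):
--             return clean_line.lstrip('#').strip()
--
--     # Fallback: Use the first non-empty line
--     for line in lines:
--         if line.strip():
--             first_val = line.strip()
--             return (first_val[:60] + '...') if len(first_val) > 60 else first_val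
--
--     return "Untitled Assignment"
-- ===== SOURCE B (Python) =====
-- def auto_extract_title(content):
--     fallback = None
--     for line in content.strip().split('\n'):
--         stripped = line.strip()
--         if stripped.startswith('#'):
--             return stripped.lstrip('#').strip()
--         if fallback is None and stripped:
--             fallback = stripped
--     if fallback is None:
--         return "Untitled Assignment"
--     return (fallback[:60] + '...') if len(fallback) > 60 else fallback
-- ===== Notes on version B (the rewrite author's own statement) =====
-- stated objective: alternative
-- what changed: Replaces A's two sequential scans over the lines (one for a '#' header, then a second for the first non-empty line) with a single pass that short-circuits on a header and keeps the first non-empty stripped line in a set-once fallback accumulator.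
import Mathlib
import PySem

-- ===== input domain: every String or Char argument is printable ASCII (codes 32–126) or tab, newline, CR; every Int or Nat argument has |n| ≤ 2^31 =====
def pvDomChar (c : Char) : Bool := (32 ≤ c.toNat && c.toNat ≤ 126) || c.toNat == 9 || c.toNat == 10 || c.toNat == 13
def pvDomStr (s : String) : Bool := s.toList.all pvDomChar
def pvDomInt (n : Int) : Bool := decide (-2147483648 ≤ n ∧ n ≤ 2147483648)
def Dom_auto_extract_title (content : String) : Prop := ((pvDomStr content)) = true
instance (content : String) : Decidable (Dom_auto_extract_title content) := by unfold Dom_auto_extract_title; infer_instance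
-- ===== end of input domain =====

-- B replaces A's two sequential scans over the lines by one pass that keeps the first
-- non-empty line as a fallback accumulator (objective: alternative; same cost).

-- ===== PORT A =====
-- first loop of A: return the first header line, cleaned ('.lstrip('#')' is exactly
-- List.dropWhile (· == '#') on the char list)
def pvALoop1 (lines : List (List Char)) : Option (List Char) :=
  match lines with
  | [] => none
  | l :: rest =>
    let cleanLine := PySem.Chars.strip l
    if PySem.Chars.startswith cleanLine ['#'] then
      some (PySem.Chars.strip (cleanLine.dropWhile (· == '#')))
    else pvALoop1 rest

-- second loop of A: first non-empty stripped line, truncated to 60 chars + '...'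
def pvALoop2 (lines : List (List Char)) : Option (List Char) :=
  match lines with
  | [] => none
  | l :: rest =>
    if PySem.Chars.strip l ≠ [] then
      let firstVal := PySem.Chars.strip l
      some (if firstVal.length > 60 then firstVal.take 60 ++ ['.', '.', '.'] else firstVal)
    else pvALoop2 rest

def auto_extract_title (content : String) : String :=
  let lines := PySem.Chars.splitOn (PySem.Chars.strip content.toList) ['\n']
  match pvALoop1 lines with
  | some t => String.ofList t
  | none =>
    match pvALoop2 lines with
    | some f => String.ofList f
    | none => "Untitled Assignment"

-- ===== PORT B =====
def pvBFinish (fallback : Option (List Char)) : String :=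
  match fallback with
  | none => "Untitled Assignment"
  | some f => String.ofList (if f.length > 60 then f.take 60 ++ ['.', '.', '.'] else f)

def pvBLoop (lines : List (List Char)) (fallback : Option (List Char)) : String :=
  match lines with
  | [] => pvBFinish fallback
  | l :: rest =>
    let stripped := PySem.Chars.strip l
    if PySem.Chars.startswith stripped ['#'] then
      String.ofList (PySem.Chars.strip (stripped.dropWhile (· == '#')))
    else
      pvBLoop rest (if fallback = none ∧ stripped ≠ [] then some stripped else fallback)

def auto_extract_title_alt (content : String) : String :=
  pvBLoop (PySem.Chars.splitOn (PySem.Chars.strip content.toList) ['\n']) none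

-- ===== PRECONDITION & SPEC =====
def Spec_auto_extract_title (content : String) (out : String) : Prop := out = auto_extract_title_alt content
instance (content : String) (out : String) : Decidable (Spec_auto_extract_title content out) := by unfold Spec_auto_extract_title; infer_instance

-- ===== CLAIM (what is proved, stated in full; the proofs are below) =====
def Claim_equal_auto_extract_title : Prop := ∀ (content : String), Dom_auto_extract_title content → Spec_auto_extract_title content (auto_extract_title content)

-- ===== LEMMAS AND PROOFS =====
lemma pvBLoop_eq (lines : List (List Char)) (fallback : Option (List Char)) :
    pvBLoop lines fallback =
      match pvALoop1 lines with
      | some t => String.ofList t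
      | none =>
        match fallback with
        | some _ => pvBFinish fallback
        | none =>
          match pvALoop2 lines with
          | some f => String.ofList f
          | none => "Untitled Assignment" := by
  induction lines generalizing fallback with
  | nil => cases fallback <;> simp [pvBLoop, pvALoop1, pvALoop2, pvBFinish]
  | cons l rest ih =>
    simp only [pvBLoop, pvALoop1, pvALoop2]
    by_cases hh : PySem.Chars.startswith (PySem.Chars.strip l) ['#'] = true
    · simp [hh]
    · simp only [hh, ih]
      cases fallback with
      | some f => simp
      | none =>
        by_cases he : PySem.Chars.strip l = []
        · simp [he]
        · simp [he, pvBFinish]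

-- ===== VERDICT (by name: the statement is the Claim_ definition above) =====
theorem auto_extract_title_spec : Claim_equal_auto_extract_title := by
  intro content _
  unfold Spec_auto_extract_title auto_extract_title auto_extract_title_alt
  rw [pvBLoop_eq]
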